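-- pv_equiv track=rewrite | github.com/VAndrejeus/sage-ch | collector/ai/risk_grouper.py | detect_risk_drivers
-- ===== SOURCE A (Python) =====
-- from typing import Any, Dict, List
--
-- DRIVER_RULES = [
--     {
--         "name": "Weak account and password controls",
--         "match_categories": {"account_management", "access_control"},
--         "match_titles": {"password", "lockout", "account", "admin", "guest"},
--     },
--     {
--         "name": "Remote access and session exposure",
--         "match_categories": {"access_control", "secure_configuration"},
--         "match_titles": {"rdp", "remote", "timeout", "inactivity"},
--     },
--     {
--         "name": "Insecure workstation configuration",
--         "match_categories": {"secure_configuration"},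
--         "match_titles": {"uac", "firewall", "autorun", "defender", "timeout", "password"},
--     },
--     {
--         "name": "Sensitive or risky application exposure",
--         "match_categories": {"application_security", "data_protection"},
--         "match_titles": {"application", "software", "browser", "vpn", "remote", "steam", "chrome", "edge"},
--     },
--     {
--         "name": "Patch and update visibility gaps",
--         "match_categories": {"patching"},
--         "match_titles": {"update", "patch", "hotfix"},
--     },
--     {
--         "name": "Audit and recovery visibility weaknesses",
--         "match_categories": {"logging", "data_protection"},
--         "match_titles": {"audit", "backup", "log"},
--     },
-- ]
--
-- def _normalized_text(finding: Dict[str, Any]) -> str: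
--     title = str(finding.get("title", "")).lower()
--     description = str(finding.get("description", "")).lower()
--     recommendation = str(finding.get("recommendation", "")).lower()
--     return f"{title} {description} {recommendation}"
--
-- def detect_risk_drivers(findings: List[Dict[str, Any]]) -> List[str]:
--     matched = []
--
--     for rule in DRIVER_RULES:
--         hits = 0
--         for finding in findings:
--             category = str(finding.get("category", "")).strip()
--             text = _normalized_text(finding)
--
--             category_match = category in rule["match_categories"]
--             keyword_match = any(keyword in text for keyword in rule["match_titles"])
--
--             if category_match or keyword_match:
--                 hits += 1
--
--         if hits > 0:
--             matched.append((rule["name"], hits))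
--
--     matched.sort(key=lambda item: item[1], reverse=True)
--     return [name for name, _count in matched[:3]]
-- ===== SOURCE B (Python) =====
-- from typing import Any, Dict, List
--
-- DRIVER_RULES = [
--     {
--         "name": "Weak account and password controls",
--         "match_categories": {"account_management", "access_control"},
--         "match_titles": {"password", "lockout", "account", "admin", "guest"},
--     },
--     {
--         "name": "Remote access and session exposure",
--         "match_categories": {"access_control", "secure_configuration"},
--         "match_titles": {"rdp", "remote", "timeout", "inactivity"},
--     },
--     {
--         "name": "Insecure workstation configuration",
--         "match_categories": {"secure_configuration"},
--         "match_titles": {"uac", "firewall", "autorun", "defender", "timeout", "password"},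
--     },
--     {
--         "name": "Sensitive or risky application exposure",
--         "match_categories": {"application_security", "data_protection"},
--         "match_titles": {"application", "software", "browser", "vpn", "remote", "steam", "chrome", "edge"},
--     },
--     {
--         "name": "Patch and update visibility gaps",
--         "match_categories": {"patching"},
--         "match_titles": {"update", "patch", "hotfix"},
--     },
--     {
--         "name": "Audit and recovery visibility weaknesses",
--         "match_categories": {"logging", "data_protection"},
--         "match_titles": {"audit", "backup", "log"},
--     },
-- ]
--
-- # Inverted indexes over the rule table, built once at import time:
-- # category -> rule indices, and a flat (keyword, rule index) stream.
-- _CAT_INDEX: Dict[str, List[int]] = {}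
-- _KW_PAIRS: List[tuple] = []
-- for _i, _rule in enumerate(DRIVER_RULES):
--     for _c in _rule["match_categories"]:
--         _CAT_INDEX.setdefault(_c, []).append(_i)
--     for _k in _rule["match_titles"]:
--         _KW_PAIRS.append((_k, _i))
--
--
-- def detect_risk_drivers(findings: List[Dict[str, Any]]) -> List[str]:
--     # Event-stream formulation: each finding emits the set of rule indices it
--     # matches (looked up through the inverted indexes); the flat event stream
--     # is then counted per rule, and the top three rule names are returned.
--     events: List[int] = []
--     for finding in findings:
--         category = str(finding.get("category", "")).strip()
--         text = " ".join(
--             str(finding.get(key, "")).lower()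
--             for key in ("title", "description", "recommendation")
--         )
--         matched = set(_CAT_INDEX.get(category, []))
--         matched.update(i for k, i in _KW_PAIRS if k in text)
--         events.extend(matched)
--
--     candidates = [
--         (rule["name"], events.count(i))
--         for i, rule in enumerate(DRIVER_RULES)
--         if i in events
--     ]
--     candidates.sort(key=lambda item: item[1], reverse=True)
--     return [name for name, _count in candidates[:3]]
-- ===== Notes on version B (the rewrite author's own statement) =====
-- stated objective: alternative
-- what changed: B replaces A's per-rule rescanning of the findings with an inverted index (category -> rule indices, flat keyword -> rule-index pairs) built once from the rule table; each finding emits the set of rule indices it matches into one flat event stream, which is then counted per rule before the same stable descending sort and top-3 cut.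
import Mathlib
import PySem

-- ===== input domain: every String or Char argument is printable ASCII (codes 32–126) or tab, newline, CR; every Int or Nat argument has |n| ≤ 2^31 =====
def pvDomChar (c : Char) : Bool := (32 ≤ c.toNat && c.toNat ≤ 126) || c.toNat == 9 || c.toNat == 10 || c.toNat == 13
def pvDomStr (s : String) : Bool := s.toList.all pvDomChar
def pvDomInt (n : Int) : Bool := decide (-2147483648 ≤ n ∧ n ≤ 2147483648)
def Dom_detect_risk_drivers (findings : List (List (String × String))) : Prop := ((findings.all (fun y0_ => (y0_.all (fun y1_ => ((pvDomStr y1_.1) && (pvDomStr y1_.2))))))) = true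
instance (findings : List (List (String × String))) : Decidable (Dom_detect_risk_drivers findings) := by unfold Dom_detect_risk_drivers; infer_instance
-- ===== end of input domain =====

-- B answers through an inverted index over the rule table: each finding emits the set
-- of rule indices it matches into one flat event stream, counted per rule afterwards;
-- A rescans all findings once per rule. Same return value (alternative decomposition).

-- module constant DRIVER_RULES: (name, match_categories, match_titles);
-- the Python sets are only used for membership tests, so order is irrelevant.
def pvDriverRules : List (String × List String × List String) :=
  [ ("Weak account and password controls",
     PySem.Set.ofList ["account_management", "access_control"],
     PySem.Set.ofList ["password", "lockout", "account", "admin", "guest"]),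
    ("Remote access and session exposure",
     PySem.Set.ofList ["access_control", "secure_configuration"],
     PySem.Set.ofList ["rdp", "remote", "timeout", "inactivity"]),
    ("Insecure workstation configuration",
     PySem.Set.ofList ["secure_configuration"],
     PySem.Set.ofList ["uac", "firewall", "autorun", "defender", "timeout", "password"]),
    ("Sensitive or risky application exposure",
     PySem.Set.ofList ["application_security", "data_protection"],
     PySem.Set.ofList ["application", "software", "browser", "vpn", "remote", "steam", "chrome", "edge"]),
    ("Patch and update visibility gaps",
     PySem.Set.ofList ["patching"],
     PySem.Set.ofList ["update", "patch", "hotfix"]),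
    ("Audit and recovery visibility weaknesses",
     PySem.Set.ofList ["logging", "data_protection"],
     PySem.Set.ofList ["audit", "backup", "log"]) ]

-- str(finding.get("category", "")).strip()  (values are already str on this domain)
def pvFindingCategory (f : List (String × String)) : String :=
  PySem.Str.strip ((PySem.Dict.mk f).getD "category" "")

-- _normalized_text(finding) / B's " ".join(...): lowered title, description,
-- recommendation joined by single spaces; kept as List Char (exact)
def pvNormalizedText (f : List (String × String)) : List Char :=
  PySem.Chars.lower ((PySem.Dict.mk f).getD "title" "").toList ++ [' '] ++
  PySem.Chars.lower ((PySem.Dict.mk f).getD "description" "").toList ++ [' '] ++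
  PySem.Chars.lower ((PySem.Dict.mk f).getD "recommendation" "").toList

-- ===== PORT A =====
def detect_risk_drivers (findings : List (List (String × String))) : List String :=
  let matched : List (String × Int) :=
    pvDriverRules.foldl (fun acc rule =>
      let hits : Int :=
        findings.foldl (fun hits finding =>
          let category := pvFindingCategory finding
          let text := pvNormalizedText finding
          let category_match := rule.2.1.contains category
          let keyword_match := rule.2.2.any (fun kw => PySem.Chars.isIn kw.toList text)
          if category_match || keyword_match then hits + 1 else hits) 0
      if hits > 0 then acc ++ [(rule.1, hits)] else acc) []
  ((PySem.List.sorted matched (fun item => item.2) true).take 3).map (fun p => p.1)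

-- ===== PORT B =====
-- module-level inverted index: category -> rule indices (_CAT_INDEX.setdefault(c, []).append(i))
def pvCatIndexB : PySem.Dict String (List Int) :=
  (PySem.List.enumerate pvDriverRules 0).foldl (fun d p =>
    p.2.2.1.foldl (fun d c => d.modify c [] (fun l => l ++ [p.1])) d) PySem.Dict.empty

-- module-level flat (keyword, rule index) stream (_KW_PAIRS)
def pvKwPairsB : List (String × Int) :=
  (PySem.List.enumerate pvDriverRules 0).foldl (fun acc p =>
    p.2.2.2.foldl (fun acc k => acc ++ [(k, p.1)]) acc) []

def detect_risk_drivers_alt (findings : List (List (String × String))) : List String :=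
  let events : List Int :=
    findings.foldl (fun events finding =>
      let category := pvFindingCategory finding
      let text := pvNormalizedText finding
      let matched : PySem.Set Int := PySem.Set.ofList (pvCatIndexB.getD category [])
      let matched := PySem.Set.update matched
        ((pvKwPairsB.filter (fun p => PySem.Chars.isIn p.1.toList text)).map (fun p => p.2))
      events ++ matched) []
  let candidates : List (String × Int) :=
    ((PySem.List.enumerate pvDriverRules 0).filter (fun p => events.contains p.1)).map
      (fun p => (p.2.1, (events.count p.1 : Int)))
  ((PySem.List.sorted candidates (fun item => item.2) true).take 3).map (fun p => p.1)

-- ===== PRECONDITION & SPEC =====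
def Spec_detect_risk_drivers (findings : List (List (String × String))) (out : List String) : Prop := out = detect_risk_drivers_alt findings
instance (findings : List (List (String × String))) (out : List String) : Decidable (Spec_detect_risk_drivers findings out) := by unfold Spec_detect_risk_drivers; infer_instance

-- ===== CLAIM (what is proved, stated in full; the proofs are below) =====
def Claim_equal_detect_risk_drivers : Prop := ∀ (findings : List (List (String × String))), Dom_detect_risk_drivers findings → Spec_detect_risk_drivers findings (detect_risk_drivers findings)

-- ===== LEMMAS AND PROOFS =====

-- the shared per-finding match condition of rule r
def pvCond (r : String × List String × List String) (f : List (String × String)) : Bool :=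
  r.2.1.contains (pvFindingCategory f) ||
  r.2.2.any (fun kw => PySem.Chars.isIn kw.toList (pvNormalizedText f))

-- A's per-rule inner loop, from an arbitrary start
def pvHits (r : String × List String × List String)
    (findings : List (List (String × String))) (c : Int) : Int :=
  findings.foldl (fun hits f => if pvCond r f then hits + 1 else hits) c

theorem pvHits_eq_countP (r : String × List String × List String)
    (findings : List (List (String × String))) :
    pvHits r findings 0 = (findings.countP (pvCond r) : Int) := by
  simpa using PySem.List.foldl_if_add_one (pvCond r) findings 0

-- A's rule loop builds exactly the filtered name/count list
theorem pv_A_norm (rs : List (String × List String × List String))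
    (findings : List (List (String × String))) (acc : List (String × Int)) :
    rs.foldl (fun acc rule =>
      if pvHits rule findings 0 > 0 then acc ++ [(rule.1, pvHits rule findings 0)] else acc) acc
    = acc ++ (rs.filter (fun r => pvHits r findings 0 > 0)).map
        (fun r => (r.1, pvHits r findings 0)) := by
  induction rs generalizing acc with
  | nil => simp
  | cons r rs ih =>
      simp only [List.foldl_cons, List.filter_cons]
      by_cases h : pvHits r findings 0 > 0 <;> simp [h, ih]

-- B's per-finding matched set
def pvMatched (f : List (String × String)) : PySem.Set Int :=
  PySem.Set.update (PySem.Set.ofList (pvCatIndexB.getD (pvFindingCategory f) []))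
    ((pvKwPairsB.filter (fun p => PySem.Chars.isIn p.1.toList (pvNormalizedText f))).map
      (fun p => p.2))

theorem pvMatched_nodup (f : List (String × String)) : (pvMatched f).Nodup :=
  PySem.Set.nodup_update _ _ (PySem.Set.nodup_ofList _)

-- counting the flat event stream = counting the findings the rule matches
theorem pv_events_count (findings : List (List (String × String))) (e : List Int)
    (i : Int) (r : String × List String × List String)
    (hm : ∀ f, i ∈ pvMatched f ↔ pvCond r f = true) :
    (findings.foldl (fun ev f => ev ++ pvMatched f) e).count i
      = e.count i + findings.countP (pvCond r) := by
  induction findings generalizing e with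
  | nil => simp
  | cons f fs ih =>
      simp only [List.foldl_cons, List.countP_cons]
      rw [ih, List.count_append]
      by_cases h : pvCond r f = true
      · rw [List.count_eq_one_of_mem (pvMatched_nodup f) ((hm f).mpr h)]
        simp [h]; omega
      · rw [List.count_eq_zero.mpr (fun hmem => h ((hm f).mp hmem))]
        simp [h]

-- the rule table and its enumeration, with the Set literals evaluated
theorem pvEnumRules_lit : PySem.List.enumerate pvDriverRules 0 =
    [ (0, "Weak account and password controls",
        ["account_management", "access_control"],
        ["password", "lockout", "account", "admin", "guest"]),
      (1, "Remote access and session exposure",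
        ["access_control", "secure_configuration"],
        ["rdp", "remote", "timeout", "inactivity"]),
      (2, "Insecure workstation configuration",
        ["secure_configuration"],
        ["uac", "firewall", "autorun", "defender", "timeout", "password"]),
      (3, "Sensitive or risky application exposure",
        ["application_security", "data_protection"],
        ["application", "software", "browser", "vpn", "remote", "steam", "chrome", "edge"]),
      (4, "Patch and update visibility gaps",
        ["patching"],
        ["update", "patch", "hotfix"]),
      (5, "Audit and recovery visibility weaknesses",
        ["logging", "data_protection"],
        ["audit", "backup", "log"]) ] := by
  set_option maxRecDepth 100000 in rfl

-- the two inverted-index constants, evaluated (build order of the literals)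
theorem pvCatIndexB_lit : pvCatIndexB = PySem.Dict.mk
    [("account_management", [0]), ("access_control", [0, 1]), ("secure_configuration", [1, 2]),
     ("application_security", [3]), ("data_protection", [3, 5]), ("patching", [4]), ("logging", [5])] := by
  set_option maxRecDepth 100000 in rfl

theorem pvKwPairsB_lit : pvKwPairsB =
    [("password", 0), ("lockout", 0), ("account", 0), ("admin", 0), ("guest", 0),
     ("rdp", 1), ("remote", 1), ("timeout", 1), ("inactivity", 1),
     ("uac", 2), ("firewall", 2), ("autorun", 2), ("defender", 2), ("timeout", 2), ("password", 2),
     ("application", 3), ("software", 3), ("browser", 3), ("vpn", 3), ("remote", 3), ("steam", 3),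
     ("chrome", 3), ("edge", 3), ("update", 4), ("patch", 4), ("hotfix", 4),
     ("audit", 5), ("backup", 5), ("log", 5)] := by
  set_option maxRecDepth 100000 in rfl

-- the category index answers exactly rule p.2's category test, for every rule
theorem pvCatChar (p : Int × (String × List String × List String))
    (hp : p ∈ PySem.List.enumerate pvDriverRules 0) (c : String) :
    p.1 ∈ pvCatIndexB.getD c [] ↔ p.2.2.1.contains c = true := by
  rw [pvEnumRules_lit] at hp
  rw [pvCatIndexB_lit, PySem.Dict.getD_eq_get?_getD,
    PySem.Dict.get?_mk_cons, PySem.Dict.get?_mk_cons, PySem.Dict.get?_mk_cons,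
    PySem.Dict.get?_mk_cons, PySem.Dict.get?_mk_cons, PySem.Dict.get?_mk_cons,
    PySem.Dict.get?_mk_cons]
  simp only [List.mem_cons, List.not_mem_nil, or_false] at hp
  rcases hp with rfl | rfl | rfl | rfl | rfl | rfl <;>
    split_ifs <;> simp_all [PySem.Dict.get?, beq_iff_eq] <;>
      (repeat' constructor) <;> intro h2 <;> subst h2 <;> simp_all

-- the flat keyword stream answers exactly rule p.2's keyword test
theorem pvKwChar (p : Int × (String × List String × List String))
    (hp : p ∈ PySem.List.enumerate pvDriverRules 0) (t : List Char) :
    (∃ q ∈ pvKwPairsB, PySem.Chars.isIn q.1.toList t = true ∧ q.2 = p.1) ↔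
      p.2.2.2.any (fun kw => PySem.Chars.isIn kw.toList t) = true := by
  rw [pvEnumRules_lit] at hp
  simp only [List.mem_cons, List.not_mem_nil, or_false] at hp
  rcases hp with rfl | rfl | rfl | rfl | rfl | rfl <;>
    simp [pvKwPairsB_lit]

theorem pv_mem_matched (p : Int × (String × List String × List String))
    (hp : p ∈ PySem.List.enumerate pvDriverRules 0) (f : List (String × String)) :
    p.1 ∈ pvMatched f ↔ pvCond p.2 f = true := by
  rw [pvMatched, pvCond]
  simp only [PySem.Set.mem_update, PySem.Set.mem_ofList, List.mem_map, List.mem_filter,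
    Bool.or_eq_true]
  constructor
  · rintro (h | ⟨q, ⟨hq, hin⟩, hqi⟩)
    · exact Or.inl ((pvCatChar p hp _).mp h)
    · exact Or.inr ((pvKwChar p hp _).mp ⟨q, hq, hin, hqi⟩)
  · rintro (h | h)
    · exact Or.inl ((pvCatChar p hp _).mpr h)
    · obtain ⟨q, hq, hin, hqi⟩ := (pvKwChar p hp _).mpr h
      exact Or.inr ⟨q, ⟨hq, hin⟩, hqi⟩

-- membership in the event stream = the rule fires on some finding
theorem pv_events_mem (findings : List (List (String × String))) (e : List Int)
    (i : Int) (r : String × List String × List String)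
    (hm : ∀ f, i ∈ pvMatched f ↔ pvCond r f = true) :
    (findings.foldl (fun ev f => ev ++ pvMatched f) e).contains i
      = decide (0 < e.count i + findings.countP (pvCond r)) := by
  have h := pv_events_count findings e i r hm
  have h2 : (findings.foldl (fun ev f => ev ++ pvMatched f) e).contains i
      = decide (0 < (findings.foldl (fun ev f => ev ++ pvMatched f) e).count i) := by
    simp [List.count_pos_iff]
  rw [h2, h]

-- the generic assembly: B's enumerate/filter/map candidates = A's filter/map list
theorem pv_assemble (rs : List (String × List String × List String))
    (events : List Int) (h : (String × List String × List String) → Int) (s : Int)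
    (hc : ∀ p ∈ PySem.List.enumerate rs s, (events.count p.1 : Int) = h p.2)
    (hm : ∀ p ∈ PySem.List.enumerate rs s, events.contains p.1 = decide (0 < h p.2)) :
    ((PySem.List.enumerate rs s).filter (fun p => events.contains p.1)).map
        (fun p => (p.2.1, (events.count p.1 : Int)))
      = (rs.filter (fun r => h r > 0)).map (fun r => (r.1, h r)) := by
  induction rs generalizing s with
  | nil => simp [PySem.List.enumerate]
  | cons r rs ih =>
      rw [PySem.List.enumerate_cons]
      have hmr : events.contains s = decide (0 < h r) :=
        hm (s, r) (by rw [PySem.List.enumerate_cons]; exact List.mem_cons_self)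
      have hcr : (events.count s : Int) = h r :=
        hc (s, r) (by rw [PySem.List.enumerate_cons]; exact List.mem_cons_self)
      have hrest := ih (s + 1)
        (fun p hp => hc p (by rw [PySem.List.enumerate_cons]; exact List.mem_cons_of_mem _ hp))
        (fun p hp => hm p (by rw [PySem.List.enumerate_cons]; exact List.mem_cons_of_mem _ hp))
      by_cases h0 : 0 < h r
      · simp only [List.filter_cons, hmr, gt_iff_lt, h0, decide_true, if_true,
          List.map_cons, hcr, hrest]
      · simp only [List.filter_cons, hmr, gt_iff_lt, h0, decide_false,
          Bool.false_eq_true, if_false, hrest]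

-- ===== VERDICT (by name: the statement is the Claim_ definition above) =====
theorem detect_risk_drivers_spec : Claim_equal_detect_risk_drivers := by
  intro findings _
  unfold Spec_detect_risk_drivers
  have hA : detect_risk_drivers findings =
      ((PySem.List.sorted
        (pvDriverRules.foldl (fun acc rule =>
          if pvHits rule findings 0 > 0 then acc ++ [(rule.1, pvHits rule findings 0)] else acc) [])
        (fun item => item.2) true).take 3).map (fun p => p.1) := rfl
  have hB : detect_risk_drivers_alt findings =
      ((PySem.List.sorted
        (((PySem.List.enumerate pvDriverRules 0).filter (fun p =>
            (findings.foldl (fun ev f => ev ++ pvMatched f) []).contains p.1)).map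
          (fun p => (p.2.1, ((findings.foldl (fun ev f => ev ++ pvMatched f) []).count p.1 : Int))))
        (fun item => item.2) true).take 3).map (fun p => p.1) := rfl
  have hcand := pv_assemble pvDriverRules
    (findings.foldl (fun ev f => ev ++ pvMatched f) []) (fun r => pvHits r findings 0) 0
    (fun p hp => by
      simpa [pvHits_eq_countP] using
        pv_events_count findings [] p.1 p.2 (pv_mem_matched p hp))
    (fun p hp => by
      simpa [pvHits_eq_countP] using
        pv_events_mem findings [] p.1 p.2 (pv_mem_matched p hp))
  rw [hA, hB, pv_A_norm pvDriverRules findings [], List.nil_append]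
  exact (congrArg (fun l => ((PySem.List.sorted l (fun item : String × Int => item.2) true).take 3).map
    (fun p => p.1)) hcand).symm
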